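-- pv_equiv track=rewrite | github.com/Tenehuini/amaze-python | amaze.py | go_up
-- ===== SOURCE A (Python) =====
-- WALL = '#'
--
-- PASSED = '.'
--
-- PLAYER = '@'
--
-- def can_move(x, y, maze):
--     if x < 0 or y < 0 or x > len(maze) or y > len(maze[x]):
--         return False
--
--     return maze[x][y] != WALL
--
-- def go_up(position, maze, missing_spaces):
--     x_position = position[0]
--     y_position = position[1]
--
--     while can_move(x_position - 1, y_position, maze):
--         x_position = x_position - 1
--         maze[x_position + 1][y_position] = PASSED
--         maze[x_position][y_position] = PLAYER
--
--         try:
--             missing_spaces.remove((x_position, y_position))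
--         except ValueError:
--             pass
--     return x_position, y_position
-- ===== SOURCE B (Python) =====
-- WALL = '#'
--
-- PASSED = '.'
--
-- PLAYER = '@'
--
-- def go_up(position, maze, missing_spaces):
--     # Explicit-bounds scan with a for/break over the candidate rows above the
--     # player (no can_move helper), then one batch mutation pass.
--     x0, y = position
--     x_final = x0
--     for r in range(x0 - 1, -1, -1):
--         if y < 0 or r >= len(maze) or y >= len(maze[r]) or maze[r][y] == WALL:
--             break
--         x_final = r
--     if x_final != x0:
--         for r in range(x0 - 1, x_final - 1, -1):
--             maze[r + 1][y] = PASSED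
--             try:
--                 missing_spaces.remove((r, y))
--             except ValueError:
--                 pass
--         maze[x_final][y] = PLAYER
--     return x_final, y
-- ===== Notes on version B (the rewrite author's own statement) =====
-- stated objective: alternative
-- what changed: A repeatedly calls the can_move helper in a while-loop that mutates as it walks; B has no helper at all: it runs a for/break scan with explicit inline bounds checks over range(x0-1,-1,-1) to find the final row, then performs all PASSED writes, removals and the PLAYER write in one batch pass.
-- outside the precondition, e.g. on go_up((2, 1), [['a'], ['#', '#'], ['p', 'q']], []): A returns (2, 1), B returns (2, 1)
import Mathlib
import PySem

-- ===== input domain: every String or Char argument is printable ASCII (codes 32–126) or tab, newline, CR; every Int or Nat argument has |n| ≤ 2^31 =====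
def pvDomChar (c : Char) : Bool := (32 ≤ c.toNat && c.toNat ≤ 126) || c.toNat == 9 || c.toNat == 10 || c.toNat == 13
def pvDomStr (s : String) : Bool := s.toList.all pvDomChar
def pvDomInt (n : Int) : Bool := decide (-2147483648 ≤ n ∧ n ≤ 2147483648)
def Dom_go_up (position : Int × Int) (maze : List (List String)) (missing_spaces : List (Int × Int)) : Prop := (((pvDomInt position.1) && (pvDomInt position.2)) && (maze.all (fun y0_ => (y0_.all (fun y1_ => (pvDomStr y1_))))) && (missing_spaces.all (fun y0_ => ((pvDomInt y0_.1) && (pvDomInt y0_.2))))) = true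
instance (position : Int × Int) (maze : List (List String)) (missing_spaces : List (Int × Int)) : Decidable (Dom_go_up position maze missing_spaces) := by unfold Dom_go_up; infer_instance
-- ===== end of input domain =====

-- B replaces A's can_move-driven mutating while-loop by a for/break scan with inline bounds
-- checks over the candidate rows, followed by one batch mutation pass (a different
-- decomposition, same cost). Both mutate maze and missing_spaces in place identically;
-- the equivalence proved here is about the RETURN value.

-- ===== PORT A =====

-- maze[i][j] = v  (both indices are nonnegative whenever A executes the assignment inside Pre_)
def pvSetCell (m : List (List String)) (i j : Int) (v : String) : List (List String) :=
  m.modify i.toNat (fun row => row.set j.toNat v)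

def can_move (x y : Int) (maze : List (List String)) : Bool :=
  if x < 0 || y < 0 || x > (maze.length : Int) then false
  else
    match PySem.List.pyGet? maze x with
    | none => false   -- maze[x] IndexError (x = len(maze)): excluded by Pre_go_up
    | some row =>
      if y > (row.length : Int) then false
      else
        match PySem.List.pyGet? row y with
        | none => false   -- maze[x][y] IndexError (y = len(row)): excluded by Pre_go_up
        | some c => c ≠ "#"

theorem can_move_nonneg {x y : Int} {maze : List (List String)}
    (h : can_move x y maze = true) : 0 ≤ x := by
  unfold can_move at h
  by_cases hx : x < 0
  · simp [hx] at h
  · omega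

-- the while-loop of A, threading the mutated maze and missing_spaces
def go_up_loop (x y : Int) (maze : List (List String)) (missing : List (Int × Int)) : Int :=
  if h : can_move (x - 1) y maze then
    let x' := x - 1
    let maze1 := pvSetCell maze (x' + 1) y "."
    let maze2 := pvSetCell maze1 x' y "@"
    let missing' := (PySem.List.remove? missing (x', y)).getD missing  -- try/except ValueError
    go_up_loop x' y maze2 missing'
  else x
termination_by x.toNat
decreasing_by
  have := can_move_nonneg h
  omega

def go_up (position : Int × Int) (maze : List (List String)) (missing_spaces : List (Int × Int)) : Int × Int :=
  let x_position := position.1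
  let y_position := position.2
  (go_up_loop x_position y_position maze missing_spaces, y_position)

-- ===== PORT B =====

-- one step of Source B's for/break scan: the flag records that 'break' has fired
def stepB (maze : List (List String)) (y : Int) (s : Bool × Int) (r : Int) : Bool × Int :=
  if s.1 then s
  else if y < 0 || (maze.length : Int) ≤ r
        || ((maze.getD r.toNat []).length : Int) ≤ y
        || ((maze.getD r.toNat []).getD y.toNat "") == "#" then (true, s.2)
  else (false, r)

def go_up_alt (position : Int × Int) (maze : List (List String)) (missing_spaces : List (Int × Int)) : Int × Int :=
  let x0 := position.1
  let y := position.2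
  let x_final :=
    ((PySem.List.pyRange (x0 - 1) (-1) (-1)).foldl (stepB maze y) (false, x0)).2
  -- batch mutation pass of Source B (in-place in Python; does not feed into the return value)
  let _mut :=
    if x_final ≠ x0 then
      let s2 := (PySem.List.pyRange (x0 - 1) (x_final - 1) (-1)).foldl
        (fun (s : List (List String) × List (Int × Int)) r =>
          (s.1.modify (r + 1).toNat (fun row => row.set y.toNat "."),
           (PySem.List.remove? s.2 (r, y)).getD s.2))
        (maze, missing_spaces)
      (s2.1.modify x_final.toNat (fun row => row.set y.toNat "@"), s2.2)
    else (maze, missing_spaces)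
  (x_final, y)

-- ===== PRECONDITION & SPEC =====
-- Pre_go_up excludes the inputs where A raises IndexError through can_move's off-by-one
-- bounds (x = len(maze)+1, or y equal to the length of a row below the start) or through
-- the first PASSED write landing on row position[0] when that row is missing or too short;
-- the row-length conjunct is slightly wider than the exact raising set (a wall may stop the
-- scan before such a row is read), on which excluded inputs A and B return the same value.
def Pre_go_up (position : Int × Int) (maze : List (List String)) (missing_spaces : List (Int × Int)) : Prop :=
  ¬ (0 ≤ position.2 ∧ position.1 = (maze.length : Int) + 1) ∧
  (∀ i : Nat, i < maze.length → (i : Int) < position.1 →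
      position.2 ≠ ((maze.getD i []).length : Int)) ∧
  ((1 ≤ position.1 ∧ position.1 ≤ (maze.length : Int) ∧ 0 ≤ position.2 ∧
      position.2 < ((maze.getD (position.1 - 1).toNat []).length : Int) ∧
      (maze.getD (position.1 - 1).toNat []).getD position.2.toNat "" ≠ "#")
    → (position.1 < (maze.length : Int) ∧
       position.2 < ((maze.getD position.1.toNat []).length : Int)))
instance (position : Int × Int) (maze : List (List String)) (missing_spaces : List (Int × Int)) : Decidable (Pre_go_up position maze missing_spaces) := by unfold Pre_go_up; infer_instance

def pvWitness_go_up : (Int × Int) × List (List String) × (List (Int × Int)) :=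
  ((2, 0), [["."], ["#"], ["@"]], [(1, 0)])

def Spec_go_up (position : Int × Int) (maze : List (List String)) (missing_spaces : List (Int × Int)) (out : Int × Int) : Prop := out = go_up_alt position maze missing_spaces
instance (position : Int × Int) (maze : List (List String)) (missing_spaces : List (Int × Int)) (out : Int × Int) : Decidable (Spec_go_up position maze missing_spaces out) := by unfold Spec_go_up; infer_instance

-- ===== CLAIM (what is proved, stated in full; the proofs are below) =====
def Claim_equal_go_up : Prop := ∀ (position : Int × Int) (maze : List (List String)) (missing_spaces : List (Int × Int)), Dom_go_up position maze missing_spaces → Pre_go_up position maze missing_spaces → Spec_go_up position maze missing_spaces (go_up position maze missing_spaces)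

-- ===== LEMMAS AND PROOFS =====

-- once the break flag is set, the rest of the fold is inert
theorem stepB_stopped (maze : List (List String)) (y : Int) :
    ∀ (l : List Int) (x : Int), l.foldl (stepB maze y) (true, x) = (true, x) := by
  intro l
  induction l with
  | nil => intro x; rfl
  | cons r t ih => intro x; simpa [stepB] using ih x

theorem length_pvSetCell (m : List (List String)) (i j : Int) (v : String) :
    (pvSetCell m i j v).length = m.length := by
  simp [pvSetCell]

theorem getElem?_pvSetCell_ne (m : List (List String)) (i j : Int) (v : String)
    (a : Nat) (ha : a ≠ i.toNat) : (pvSetCell m i j v)[a]? = m[a]? := by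
  simp [pvSetCell, Ne.symm ha]

-- for a nonnegative row index, can_move is the negation of B's inline break condition
theorem can_move_eq_not_blocked (r y : Int) (m : List (List String)) (hr : 0 ≤ r) :
    can_move r y m =
      !(y < 0 || (m.length : Int) ≤ r
        || ((m.getD r.toNat []).length : Int) ≤ y
        || ((m.getD r.toNat []).getD y.toNat "") == "#") := by
  unfold can_move
  by_cases hy : y < 0
  · simp [hy, not_lt.mpr hr]
  · by_cases hlen : (m.length : Int) ≤ r
    · by_cases hgt : r > (m.length : Int)
      · simp [hy, hgt, hlen, not_lt.mpr hr]
      · have hx : r = (m.length : Int) := by omega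
        have hnone : PySem.List.pyGet? m r = none := by
          rw [PySem.List.pyGet?_of_nonneg (xs := m) hr]
          simp [hx]
        simp [hy, not_lt.mpr hr, hlen, hnone, hgt]
    · have hrl : r.toNat < m.length := by omega
      have hopt : m[r.toNat]? = some m[r.toNat] := List.getElem?_eq_getElem hrl
      have hrow : PySem.List.pyGet? m r = some m[r.toNat] := by
        rw [PySem.List.pyGet?_of_nonneg (xs := m) hr]
        simp [hrl]
      have hgt : ¬ r > (m.length : Int) := by omega
      by_cases hyl : ((m[r.toNat] : List String).length : Int) ≤ y
      · by_cases hygt : y > ((m[r.toNat] : List String).length : Int)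
        · simp [hy, hgt, hrow, hygt, not_lt.mpr hr, hlen, hopt]
          intro h
          omega
        · have hnone : PySem.List.pyGet? (m[r.toNat] : List String) y = none := by
            rw [PySem.List.pyGet?_of_nonneg (xs := (m[r.toNat] : List String)) (by omega)]
            simp
            omega
          simp [hy, hgt, hrow, hygt, hnone, not_lt.mpr hr, hlen, hopt]
          intro h
          omega
      · have hyl' : y.toNat < (m[r.toNat] : List String).length := by omega
        have hcell : PySem.List.pyGet? (m[r.toNat] : List String) y
            = some (m[r.toNat] : List String)[y.toNat] := by
          rw [PySem.List.pyGet?_of_nonneg (xs := (m[r.toNat] : List String)) (by omega)]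
          simp [hyl']
        simp [hy, hgt, hrow, hcell, not_lt.mpr hr, hlen, hopt,
              List.getElem?_eq_getElem hyl']
        by_cases hc : (m[r.toNat] : List String)[y.toNat] = "#"
        · simp [hc]
        · have h1 : ((m[r.toNat] : List String)[y.toNat] == "#") = false :=
            beq_eq_false_iff_ne.mpr hc
          have h2 : ¬ (((m[r.toNat] : List String).length : Int) < y) := by omega
          simp [h1, h2, hyl, hc]

-- B's break condition only reads the maze's length and row r: stable under agreement below x
theorem stepB_congr (y x : Int) (m m0 : List (List String))
    (hlen : m.length = m0.length)
    (hget : ∀ a : Nat, (a : Int) < x → m[a]? = m0[a]?)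
    (r : Int) (hr : 0 ≤ r) (hrx : r < x) (s : Bool × Int) :
    stepB m y s r = stepB m0 y s r := by
  have h1 : m.getD r.toNat [] = m0.getD r.toNat [] := by
    rw [List.getD_eq_getElem?_getD, List.getD_eq_getElem?_getD,
        hget r.toNat (by omega)]
  unfold stepB
  rw [hlen, h1]

-- A's loop ignores the cells it has already painted: it equals B's break-fold over the
-- original maze as long as the mazes agree strictly below x.
theorem go_up_loop_eq_fold (y : Int) :
    ∀ (n : Nat) (x : Int) (m m0 : List (List String)) (miss : List (Int × Int)),
      x.toNat ≤ n → m.length = m0.length →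
      (∀ a : Nat, (a : Int) < x → m[a]? = m0[a]?) →
      go_up_loop x y m miss
        = ((PySem.List.pyRange (x - 1) (-1) (-1)).foldl (stepB m0 y) (false, x)).2 := by
  intro n
  induction n with
  | zero =>
    intro x m m0 miss hx hlen hget
    have hx0 : x ≤ 0 := by omega
    rw [go_up_loop, PySem.List.pyRange_neg_one_eq_nil (by omega)]
    have hcm : can_move (x - 1) y m = false := by
      unfold can_move
      have : x - 1 < 0 := by omega
      simp [this]
    simp [hcm]
  | succ k ih =>
    intro x m m0 miss hx hlen hget
    by_cases hx0 : x ≤ 0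
    · rw [go_up_loop, PySem.List.pyRange_neg_one_eq_nil (by omega)]
      have hcm : can_move (x - 1) y m = false := by
        unfold can_move
        have : x - 1 < 0 := by omega
        simp [this]
      simp [hcm]
    · have hx1 : 0 ≤ x - 1 := by omega
      rw [PySem.List.pyRange_neg_one_cons (by omega), List.foldl_cons]
      have hcongr := stepB_congr y x m m0 hlen hget (x - 1) hx1 (by omega) (false, x)
      have hcm : can_move (x - 1) y m
          = !(y < 0 || (m0.length : Int) ≤ (x - 1)
            || ((m0.getD (x - 1).toNat []).length : Int) ≤ y
            || ((m0.getD (x - 1).toNat []).getD y.toNat "") == "#") := by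
        rw [can_move_eq_not_blocked (x - 1) y m hx1]
        have h1 : m.getD (x - 1).toNat [] = m0.getD (x - 1).toNat [] := by
          rw [List.getD_eq_getElem?_getD, List.getD_eq_getElem?_getD,
              hget (x - 1).toNat (by omega)]
        rw [hlen, h1]
      rw [go_up_loop]
      by_cases hb : (y < 0 || (m0.length : Int) ≤ (x - 1)
            || ((m0.getD (x - 1).toNat []).length : Int) ≤ y
            || ((m0.getD (x - 1).toNat []).getD y.toNat "") == "#") = true
      · -- blocked: A's loop stops, B's fold sets the flag and stays at x
        have hcmf : can_move (x - 1) y m = false := by rw [hcm, hb]; rfl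
        have hstep : stepB m0 y (false, x) (x - 1) = (true, x) := by
          unfold stepB
          rw [hb]
          rfl
        rw [hstep, stepB_stopped]
        simp [hcmf]
      · -- open: A steps to x-1, B's fold records (false, x-1); apply the IH
        have hbf : (y < 0 || (m0.length : Int) ≤ (x - 1)
            || ((m0.getD (x - 1).toNat []).length : Int) ≤ y
            || ((m0.getD (x - 1).toNat []).getD y.toNat "") == "#") = false := by
          simpa using hb
        have hcmt : can_move (x - 1) y m = true := by rw [hcm, hbf]; rfl
        have hstep : stepB m0 y (false, x) (x - 1) = (false, x - 1) := by
          unfold stepB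
          rw [hbf]
          rfl
        rw [hstep]
        simp only [hcmt, dite_true]
        have hsub : x - 1 - 1 = x - 2 := by ring
        apply ih
        · omega
        · rw [length_pvSetCell, length_pvSetCell, hlen]
        · intro a ha
          rw [getElem?_pvSetCell_ne, getElem?_pvSetCell_ne]
          · exact hget a (by omega)
          · omega
          · omega

-- ===== VERDICT (by name: the statement is the Claim_ definition above) =====
theorem go_up_spec : Claim_equal_go_up := by
  intro position maze missing_spaces _ _
  unfold Spec_go_up go_up go_up_alt
  have h := go_up_loop_eq_fold position.2 position.1.toNat position.1 maze maze
      missing_spaces le_rfl rfl (fun a _ => rfl)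
  simp only [h]
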